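-- pv_equiv track=rewrite | github.com/frolv/xyzzy | xyzzy/arguments.py | read_quoted
-- ===== SOURCE A (Python) =====
-- def read_quoted(s, arg, i):
--     quote = s[i]
--     start = i
--     i += 1
--
--     if quote == '`':
--         arg.append(quote)
--
--     while i < len(s):
--         if s[i] == quote:
--             if quote == '`':
--                 arg.append(quote)
--             break
--         elif s[i] == '\\':
--             arg.append(s[i + 1] if i + 1 < len(s) else s[i])
--             i += 2
--         else:
--             arg.append(s[i])
--             i += 1
--
--     if quote == '`':
--         arg.append(quote)
--
--     if i == len(s):
--         raise MatrixBot.UnterminatedQuoteError()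
--
--     return i - start + 1
-- ===== SOURCE B (Python) =====
-- def read_quoted(s, arg, i):
--     quote = s[i]
--     tick = [quote] if quote == '`' else []
--     arg.extend(tick)
--     j = i + 1
--     n = len(s)
--     while j < n:
--         q = s.find(quote, j)
--         b = s.find('\\', j)
--         if q != -1 and (b == -1 or q <= b):
--             # the next special character is the closing quote
--             arg.extend(s[j:q])
--             arg.extend(tick)
--             j = q
--             break
--         if b == -1:
--             # neither a quote nor a backslash remains
--             arg.extend(s[j:])
--             j = n
--             break
--         # a backslash comes first: copy the plain run, then the escaped char
--         arg.extend(s[j:b])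
--         arg.append(s[b + 1] if b + 1 < n else s[b])
--         j = b + 2
--     arg.extend(tick)
--     if j == n:
--         raise ValueError('unterminated quote')
--     return j - i + 1
-- ===== Notes on version B (the rewrite author's own statement) =====
-- stated objective: alternative
-- what changed: Replaces A's character-at-a-time while loop by a delimiter-jumping scan (str.find locates the next quote/backslash, the plain run before it is copied with one bulk extend); Pre_ restricts to the parser's natural domain of a start index >= -1: below -1 A's value comes from Python negative-index wraparound (the loop scans the tail and then re-scans the whole string), an accident of implementation.
-- outside the precondition, e.g. on read_quoted("'ab'x", [], -5): A returns 4, B returns 9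
import Mathlib
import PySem

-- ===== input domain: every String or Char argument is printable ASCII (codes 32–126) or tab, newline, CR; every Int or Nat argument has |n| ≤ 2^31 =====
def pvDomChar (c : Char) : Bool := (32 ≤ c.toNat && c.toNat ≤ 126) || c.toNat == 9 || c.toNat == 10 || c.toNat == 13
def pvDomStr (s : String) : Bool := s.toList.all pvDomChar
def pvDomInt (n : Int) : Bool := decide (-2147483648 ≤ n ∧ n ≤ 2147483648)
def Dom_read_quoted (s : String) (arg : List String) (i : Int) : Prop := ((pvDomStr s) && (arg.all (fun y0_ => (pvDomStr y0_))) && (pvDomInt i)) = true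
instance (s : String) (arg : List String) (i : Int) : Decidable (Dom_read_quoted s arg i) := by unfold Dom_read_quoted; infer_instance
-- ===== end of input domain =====

-- B replaces A's character-at-a-time while loop by a delimiter-jumping scan (str.find to the
-- next quote/backslash plus one bulk extend per run); equivalence is about the RETURN value
-- only — both Pythons also mutate `arg` in place (and do so identically on Pre_), but that
-- effect is not modelled here. The fuel argument of each loop is only a totality guard: on
-- every admitted input the fuel given at the call site exceeds the loop's iteration count.

-- ===== PORT A =====
-- A's while loop: walk one character (or two, on a backslash) at a time; returns the final i.
def pvLoopA (t : List Char) (q : Char) : Nat → Int → Int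
  | 0, i => i
  | fuel + 1, i =>
    if i < (t.length : Int) then
      match PySem.List.pyGet? t i with
      | none => i          -- IndexError in Python (unreachable from an index A accepts)
      | some c =>
        if c = q then i
        else if c = '\\' then pvLoopA t q fuel (i + 2)
        else pvLoopA t q fuel (i + 1)
    else i

def read_quoted (s : String) (arg : List String) (i : Int) : Int :=
  match PySem.Str.pyGet? s i with
  | none => 0            -- quote = s[i] raises IndexError: excluded by Pre_
  | some quote =>
    let j := pvLoopA s.toList quote (2 * s.toList.length + 2) (i + 1)
    if j = (s.toList.length : Int) then 0    -- UnterminatedQuoteError: excluded by Pre_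
    else j - i + 1

-- ===== PORT B =====
-- B's while loop: jump with str.find to the next quote/backslash; a closing quote (or the
-- escaped character) is handled per iteration, the plain run before it is copied in bulk.
def pvLoopB (t : List Char) (q : Char) : Nat → Int → Int
  | 0, j => j
  | fuel + 1, j =>
    if j < (t.length : Int) then
      if PySem.Chars.findFrom t [q] j none ≠ -1 ∧
          (PySem.Chars.findFrom t ['\\'] j none = -1 ∨
            PySem.Chars.findFrom t [q] j none ≤ PySem.Chars.findFrom t ['\\'] j none) then
        PySem.Chars.findFrom t [q] j none
      else if PySem.Chars.findFrom t ['\\'] j none = -1 then (t.length : Int)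
      else pvLoopB t q fuel (PySem.Chars.findFrom t ['\\'] j none + 2)
    else j

def read_quoted_alt (s : String) (arg : List String) (i : Int) : Int :=
  match PySem.Str.pyGet? s i with
  | none => 0            -- quote = s[i] raises IndexError: excluded by Pre_
  | some quote =>
    let j := pvLoopB s.toList quote (s.toList.length + 2) (i + 1)
    if j = (s.toList.length : Int) then 0    -- Source B raises ValueError: excluded by Pre_
    else j - i + 1

-- ===== PRECONDITION & SPEC =====
-- A's closing scan as a shape predicate on the characters after the opening quote: true iff
-- the scan hits the quote (or overshoots past a trailing backslash) instead of running off
-- the end of the string.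
def pvOkScan (q : Char) : List Char → Bool
  | [] => false
  | c :: rest =>
    if c = q then true
    else if c = '\\' then
      match rest with
      | [] => true                 -- trailing backslash: i jumps to len(s)+1, no exception
      | _ :: rest2 => pvOkScan q rest2
    else pvOkScan q rest

-- Pre_ excludes the inputs on which A raises — i outside [-len(s), len(s)) (IndexError on
-- quote = s[i]) and an unterminated quote (A's explicit raise) — and restricts to the parser's
-- natural domain of a start index ≥ -1: below -1 A's value comes from Python's negative-index
-- wraparound (the loop scans the tail and then re-scans the whole string), an accident of
-- implementation outside the parser's purpose (at i = -1 the scan starts at 0 and is ordinary).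
def Pre_read_quoted (s : String) (arg : List String) (i : Int) : Prop :=
  -(s.toList.length : Int) ≤ i ∧ -1 ≤ i ∧ i < (s.toList.length : Int) ∧
    pvOkScan (s.toList.getD (if i < 0 then i + (s.toList.length : Int) else i).toNat ' ')
      (s.toList.drop (i + 1).toNat) = true
instance (s : String) (arg : List String) (i : Int) : Decidable (Pre_read_quoted s arg i) := by
  unfold Pre_read_quoted; infer_instance

def pvWitness_read_quoted : String × List String × Int := ("'ab'", [], 0)

def Spec_read_quoted (s : String) (arg : List String) (i : Int) (out : Int) : Prop := out = read_quoted_alt s arg i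
instance (s : String) (arg : List String) (i : Int) (out : Int) : Decidable (Spec_read_quoted s arg i out) := by unfold Spec_read_quoted; infer_instance

-- ===== CLAIM (what is proved, stated in full; the proofs are below) =====
def Claim_equal_read_quoted : Prop := ∀ (s : String) (arg : List String) (i : Int), Dom_read_quoted s arg i → Pre_read_quoted s arg i → Spec_read_quoted s arg i (read_quoted s arg i)

-- ===== LEMMAS AND PROOFS =====

theorem pvSingleton_prefix_iff {c : Char} {l : List Char} : [c] <+: l ↔ l.head? = some c := by
  cases l with
  | nil => simp
  | cons a l =>
    constructor
    · rintro ⟨r, hr⟩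
      simp at hr
      simp [hr.1]
    · intro h
      simp at h
      exact ⟨l, by simp [h]⟩

theorem pvSingleton_infix_iff {c : Char} {l : List Char} : [c] <:+: l ↔ c ∈ l := by
  constructor
  · rintro ⟨p, r, hr⟩
    subst hr; simp
  · intro h
    obtain ⟨p, r, hr⟩ := List.append_of_mem h
    exact ⟨p, r, by simp [hr]⟩

theorem pvFind_char_none (l : List Char) (c : Char) :
    PySem.Chars.find l [c] = -1 ↔ ∀ m : Nat, m < l.length → l[m]? ≠ some c := by
  rw [PySem.Chars.find_eq_neg_one_iff, pvSingleton_infix_iff]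
  simp [List.mem_iff_getElem?]
  constructor
  · intro h m _ hc
    exact h m hc
  · intro h m hc
    have hm : m < l.length := by
      by_contra hm
      rw [List.getElem?_eq_none (by omega)] at hc
      simp at hc
    exact h m hm hc

theorem pvFindFrom_char_none (t : List Char) (c : Char) (k : Nat) (hk : k ≤ t.length) :
    (PySem.Chars.findFrom t [c] (k : Int) none = -1 ↔
      ∀ m : Nat, k ≤ m → m < t.length → t[m]? ≠ some c) := by
  rw [PySem.Chars.findFrom_natCast t [c] k hk]
  have : PySem.Chars.find (List.drop k t) [c] = -1 ↔
      ∀ m : Nat, m < t.length - k → (List.drop k t)[m]? ≠ some c := by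
    simpa using pvFind_char_none (List.drop k t) c
  constructor
  · intro h m h1 h2
    have h' : PySem.Chars.find (List.drop k t) [c] = -1 := by
      by_contra hne
      simp [hne] at h
      have := PySem.Chars.neg_one_le_find (List.drop k t) [c]
      omega
    have := (this.mp h') (m - k) (by omega)
    rw [List.getElem?_drop] at this
    have hkm : k + (m - k) = m := by omega
    rw [hkm] at this
    exact this
  · intro h
    have h' : PySem.Chars.find (List.drop k t) [c] = -1 := by
      rw [this]
      intro m hm
      rw [List.getElem?_drop]
      exact h (k + m) (by omega) (by omega)
    simp [h']

theorem pvFindFrom_char_found (t : List Char) (c : Char) (k : Nat) (hk : k ≤ t.length)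
    (h : PySem.Chars.findFrom t [c] (k : Int) none ≠ -1) :
    ∃ m : Nat, PySem.Chars.findFrom t [c] (k : Int) none = (m : Int) ∧ k ≤ m ∧ m < t.length ∧
      t[m]? = some c ∧ ∀ p : Nat, k ≤ p → p < m → t[p]? ≠ some c := by
  rw [PySem.Chars.findFrom_natCast t [c] k hk] at h ⊢
  have hne : PySem.Chars.find (List.drop k t) [c] ≠ -1 := by
    intro h0; simp [h0] at h
  have hge : 0 ≤ PySem.Chars.find (List.drop k t) [c] := by
    have := PySem.Chars.neg_one_le_find (List.drop k t) [c]
    omega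
  obtain ⟨hpre, hmin⟩ := PySem.Chars.find_spec hge
  set r := (PySem.Chars.find (List.drop k t) [c]).toNat with hr
  refine ⟨k + r, ?_, by omega, ?_, ?_, ?_⟩
  · simp [hne]; omega
  · -- position is inside t: the prefix [c] of a drop forces the drop non-empty
    rw [pvSingleton_prefix_iff, List.head?_drop, List.getElem?_drop] at hpre
    by_contra hlen
    rw [List.getElem?_eq_none (by omega)] at hpre
    simp at hpre
  · have := hpre
    rw [pvSingleton_prefix_iff, List.head?_drop, List.getElem?_drop] at this
    exact this
  · intro p h1 h2
    have := hmin (p - k) (by omega)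
    rw [pvSingleton_prefix_iff, List.head?_drop, List.getElem?_drop] at this
    intro hc
    apply this
    have : k + (p - k) = p := by omega
    rw [this]
    exact hc

theorem pvPyGet?_of_nonneg (t : List Char) (j : Int) (h1 : 0 ≤ j) :
    PySem.List.pyGet? t j = t[j.toNat]? := by
  have := PySem.List.pyGet?_natCast t j.toNat
  rwa [Int.toNat_of_nonneg h1] at this

-- both loops return the cursor unchanged once it is past the end, whatever the fuel
theorem pvLoopA_stop (t : List Char) (q : Char) (f : Nat) (i : Int)
    (h : (t.length : Int) ≤ i) : pvLoopA t q f i = i := by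
  cases f with
  | zero => rfl
  | succ f => rw [pvLoopA, if_neg (by omega)]

theorem pvLoopB_stop (t : List Char) (q : Char) (f : Nat) (i : Int)
    (h : (t.length : Int) ≤ i) : pvLoopB t q f i = i := by
  cases f with
  | zero => rfl
  | succ f => rw [pvLoopB, if_neg (by omega)]

-- A's loop walks unchanged over a run of non-special characters, burning one fuel per step
theorem pvLoopA_skip (t : List Char) (q : Char) :
    ∀ (k f : Nat) (i : Int),
      (∀ j : Int, i ≤ j → j < i + k →
        ∃ c, PySem.List.pyGet? t j = some c ∧ c ≠ q ∧ c ≠ '\\') →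
      i + k ≤ (t.length : Int) → k ≤ f →
      pvLoopA t q f i = pvLoopA t q (f - k) (i + k) := by
  intro k
  induction k with
  | zero => intro f i _ _ _; simp
  | succ k ih =>
    intro f i hrun hle hf
    obtain ⟨c, hc, hcq, hcb⟩ := hrun i (le_refl i) (by omega)
    obtain ⟨f', rfl⟩ : ∃ f', f = f' + 1 := ⟨f - 1, by omega⟩
    rw [pvLoopA, if_pos (by omega), hc]
    simp only [if_neg hcq, if_neg hcb]
    have := ih f' (i + 1) (fun j h1 h2 => hrun j (by omega) (by omega)) (by omega) (by omega)
    rw [this]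
    congr 1
    · omega
    · omega

-- the central lemma: on a non-negative cursor, A's character loop and B's find-jumping loop
-- return the same index, given fuel at least the number of remaining iterations on each side
theorem pvLoops_eq (t : List Char) (q : Char) :
    ∀ (j : Int) (fa fb : Nat), 0 ≤ j →
      ((t.length : Int) - j).toNat ≤ fa → ((t.length : Int) - j).toNat ≤ fb →
      pvLoopA t q fa j = pvLoopB t q fb j := by
  intro j
  induction hk : ((t.length : Int) - j).toNat using Nat.strong_induction_on generalizing j with
  | _ k ih =>
  intro fa fb hge hfa hfb
  by_cases hlt : j < (t.length : Int)
  case neg =>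
    rw [pvLoopA_stop t q fa j (by omega), pvLoopB_stop t q fb j (by omega)]
  case pos =>
  have hn0 : 0 ≤ (t.length : Int) := by positivity
  obtain ⟨fb', rfl⟩ : ∃ f', fb = f' + 1 := ⟨fb - 1, by omega⟩
  set st : Nat := j.toNat with hstdef
  have hsti : (st : Int) = j := by omega
  have hstle : st ≤ t.length := by omega
  by_cases hclose : PySem.Chars.findFrom t [q] j none ≠ -1 ∧
      (PySem.Chars.findFrom t ['\\'] j none = -1 ∨
        PySem.Chars.findFrom t [q] j none ≤ PySem.Chars.findFrom t ['\\'] j none)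
  · -- next special character is the closing quote: B jumps straight to it
    rw [pvLoopB, if_pos hlt, if_pos hclose]
    obtain ⟨mq, hqe, hq1, hq2, hq3, hq4⟩ :=
      pvFindFrom_char_found t q st hstle (by rw [hsti]; exact hclose.1)
    rw [hsti] at hqe
    -- no backslash strictly before mq either
    have hnb : ∀ p : Nat, st ≤ p → p < mq → t[p]? ≠ some '\\' := by
      rcases hclose.2 with hb1 | hb2
      · intro p h1 h2
        exact (pvFindFrom_char_none t '\\' st hstle).mp (by rw [hsti]; exact hb1) p h1 (by omega)
      · intro p h1 h2 hc
        obtain ⟨mb, hbe, hb1, hb2', hb3, hb4⟩ :=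
          pvFindFrom_char_found t '\\' st hstle (by
            rw [hsti]
            intro h0
            rw [h0, hqe] at hb2
            omega)
        rw [hsti] at hbe
        rw [hqe, hbe] at hb2
        have hplt : p < mb := by omega
        exact hb4 p h1 hplt hc
    have hskip := pvLoopA_skip t q (mq - st) fa j (by
      intro p h1 h2
      have hp0 : 0 ≤ p := by omega
      rw [pvPyGet?_of_nonneg t p hp0]
      have hplt : p.toNat < mq := by omega
      have hplen : p.toNat < t.length := by omega
      refine ⟨t[p.toNat], by simp [hplen], ?_, ?_⟩
      · intro hc; exact hq4 p.toNat (by omega) hplt (by simp [hplen, hc])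
      · intro hc; exact hnb p.toNat (by omega) hplt (by simp [hplen, hc]))
      (by omega) (by omega)
    have hz : j + ((mq - st : Nat) : Int) = (mq : Int) := by omega
    rw [hz] at hskip
    rw [hskip]
    obtain ⟨fa', hfa'⟩ : ∃ f', fa - (mq - st) = f' + 1 := ⟨fa - (mq - st) - 1, by omega⟩
    rw [hfa', pvLoopA, if_pos (by omega), pvPyGet?_of_nonneg t (mq : Int) (by omega)]
    simp [hq3, hqe]
  · rw [pvLoopB, if_pos hlt, if_neg hclose]
    by_cases hbn : PySem.Chars.findFrom t ['\\'] j none = -1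
    · -- then the quote is absent too: A walks to the end, B returns the length
      have hqn : PySem.Chars.findFrom t [q] j none = -1 := by
        by_contra h
        exact hclose ⟨h, Or.inl hbn⟩
      have hq := (pvFindFrom_char_none t q st hstle).mp (by rw [hsti]; exact hqn)
      have hb := (pvFindFrom_char_none t '\\' st hstle).mp (by rw [hsti]; exact hbn)
      rw [if_pos hbn]
      have hskip := pvLoopA_skip t q (t.length - st) fa j (by
        intro p h1 h2
        have hp0 : 0 ≤ p := by omega
        rw [pvPyGet?_of_nonneg t p hp0]
        have hplen : p.toNat < t.length := by omega
        refine ⟨t[p.toNat], by simp [hplen], ?_, ?_⟩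
        · intro hc; exact hq p.toNat (by omega) hplen (by simp [hplen, hc])
        · intro hc; exact hb p.toNat (by omega) hplen (by simp [hplen, hc]))
        (by omega) (by omega)
      have hz : j + ((t.length - st : Nat) : Int) = (t.length : Int) := by omega
      rw [hz] at hskip
      rw [hskip, pvLoopA_stop t q _ _ (by omega)]
    · -- a backslash comes first: A walks to it, escapes, and both loops continue past it
      rw [if_neg hbn]
      obtain ⟨mb, hbe, hb1, hb2, hb3, hb4⟩ := pvFindFrom_char_found t '\\' st hstle (by rw [hsti]; exact hbn)
      rw [hsti] at hbe
      -- no quote strictly before mb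
      have hnq : ∀ p : Nat, st ≤ p → p < mb → t[p]? ≠ some q := by
        by_cases hqn : PySem.Chars.findFrom t [q] j none = -1
        · intro p h1 h2
          exact (pvFindFrom_char_none t q st hstle).mp (by rw [hsti]; exact hqn) p h1 (by omega)
        · obtain ⟨mq, hqe, hq1, hq2, hq3, hq4⟩ := pvFindFrom_char_found t q st hstle (by rw [hsti]; exact hqn)
          rw [hsti] at hqe
          have hlt' : mb < mq := by
            have : ¬ PySem.Chars.findFrom t [q] j none ≤ PySem.Chars.findFrom t ['\\'] j none := by
              intro h; exact hclose ⟨hqn, Or.inr h⟩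
            rw [hqe, hbe] at this
            omega
          intro p h1 h2
          exact hq4 p h1 (by omega)
      -- the backslash is not the quote (else the quote search would have found it first)
      have hbq : '\\' ≠ q := by
        intro h
        subst h
        have hqn : PySem.Chars.findFrom t ['\\'] j none ≠ -1 := hbn
        exact hclose ⟨hqn, Or.inr (le_refl _)⟩
      have hskip := pvLoopA_skip t q (mb - st) fa j (by
        intro p h1 h2
        have hp0 : 0 ≤ p := by omega
        rw [pvPyGet?_of_nonneg t p hp0]
        have hplt : p.toNat < mb := by omega
        have hplen : p.toNat < t.length := by omega
        refine ⟨t[p.toNat], by simp [hplen], ?_, ?_⟩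
        · intro hc; exact hnq p.toNat (by omega) hplt (by simp [hplen, hc])
        · intro hc; exact hb4 p.toNat (by omega) hplt (by simp [hplen, hc]))
        (by omega) (by omega)
      have hz : j + ((mb - st : Nat) : Int) = (mb : Int) := by omega
      rw [hz] at hskip
      rw [hskip]
      obtain ⟨fa', hfa'⟩ : ∃ f', fa - (mb - st) = f' + 1 := ⟨fa - (mb - st) - 1, by omega⟩
      rw [hfa', pvLoopA, if_pos (by omega), pvPyGet?_of_nonneg t (mb : Int) (by omega)]
      have hrec := ih (((t.length : Int) - ((mb : Int) + 2)).toNat) (by omega)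
        ((mb : Int) + 2) rfl fa' fb' (by omega) (by omega) (by omega)
      rw [hbe]
      simp [hb3, hbq, hrec]

-- ===== VERDICT (by name: the statement is the Claim_ definition above) =====
theorem read_quoted_spec : Claim_equal_read_quoted := by
  intro s arg i _ hpre
  obtain ⟨h0, h1, h2, _⟩ := hpre
  unfold Spec_read_quoted read_quoted read_quoted_alt
  cases hq : PySem.Str.pyGet? s i with
  | none => rfl
  | some quote =>
    simp only []
    rw [pvLoops_eq s.toList quote (i + 1) (2 * s.toList.length + 2) (s.toList.length + 2) (by omega) (by omega) (by omega)]
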